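-- pv_equiv track=rewrite | github.com/awkim2/UIUC-LING406-MP2-bigrams | letterLangId.py | make_bigram
-- ===== SOURCE A (Python) =====
-- def make_bigram(data):
--     bigram={}
--     #per sentence
--     for sentence in data:
--         #per word index in the sentence
--         for word in range(0,len(sentence)-1):
--             #if this word is a key in the bigram already
--             if sentence[word] in bigram.keys():
--                 #If the next word is a key in the previous words dictionary, increment it
--                 if sentence[word+1] in bigram[sentence[word]].keys():
--                     bigram[sentence[word]][sentence[word+1]] += 1
--                 #If the next word is not a key, make it a key and set it to 1 occurence
--                 else:
--                     bigram[sentence[word]][sentence[word + 1]] = 1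
--             #if the word is not a key yet, make it a key
--             #and also give it a bigram key and set the value to 1
--             else:
--                 bigram[sentence[word]]={}
--                 bigram[sentence[word]][sentence[word + 1]] = 1
--
--     return(bigram)
-- ===== SOURCE B (Python) =====
-- def make_bigram(data):
--     # pass 1: flat count of every adjacent pair across the corpus
--     flat = {}
--     for sentence in data:
--         for pair in zip(sentence, sentence[1:]):
--             flat[pair] = flat.get(pair, 0) + 1
--     # pass 2: nest the flat table into result[a][b] = count
--     bigram = {}
--     for (a, b), c in flat.items():
--         if a not in bigram:
--             bigram[a] = {}
--         bigram[a][b] = c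
--     return bigram
-- ===== Notes on version B (the rewrite author's own statement) =====
-- stated objective: alternative
-- what changed: A builds the nested dict in one interleaved pass with per-level existence checks; B first accumulates a flat (first,second)-tuple-keyed count table over zip(sentence, sentence[1:]) and then nests that table into result[a][b]=count in a second pass.
import Mathlib
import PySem

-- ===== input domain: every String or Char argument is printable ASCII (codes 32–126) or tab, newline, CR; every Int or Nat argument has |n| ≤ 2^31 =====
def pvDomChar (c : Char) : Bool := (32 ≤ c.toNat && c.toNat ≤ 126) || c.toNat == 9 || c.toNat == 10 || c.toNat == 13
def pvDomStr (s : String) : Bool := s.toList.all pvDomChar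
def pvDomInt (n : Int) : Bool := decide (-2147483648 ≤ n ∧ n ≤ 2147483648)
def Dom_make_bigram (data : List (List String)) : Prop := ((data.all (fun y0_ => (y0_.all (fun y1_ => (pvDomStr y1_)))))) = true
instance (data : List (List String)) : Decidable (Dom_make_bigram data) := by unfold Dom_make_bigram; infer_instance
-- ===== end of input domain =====

-- B replaces A's single interleaved nested-dict pass by two passes: a flat (first,second)-keyed
-- count table, then nesting that table; proved to return the identical nested structure.


-- ===== PORT A =====
-- for word in range(0, len(sentence)-1): walk the sentence by index, updating the nested dict
-- with per-level 'in ... .keys()' checks; sentence[word] via pyGetD (every index is in range).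
def make_bigram (data : List (List String)) : List (String × List (String × Int)) :=
  let bigram : PySem.Dict String (PySem.Dict String Int) :=
    data.foldl (fun bigram sentence =>
      (PySem.List.pyRange 0 ((sentence.length : Int) - 1)).foldl (fun bigram word =>
        let w : String := PySem.List.pyGetD sentence word ""
        let w1 : String := PySem.List.pyGetD sentence (word + 1) ""
        if bigram.contains w then
          if (bigram.getD w PySem.Dict.empty).contains w1 then
            bigram.insert w ((bigram.getD w PySem.Dict.empty).insert w1
              ((bigram.getD w PySem.Dict.empty).getD w1 0 + 1))
          else
            bigram.insert w ((bigram.getD w PySem.Dict.empty).insert w1 1)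
        else
          let bigram := bigram.insert w (PySem.Dict.empty : PySem.Dict String Int)
          bigram.insert w ((bigram.getD w PySem.Dict.empty).insert w1 1)
      ) bigram) PySem.Dict.empty
  bigram.items.map (fun p => (p.1, p.2.items))

-- ===== PORT B =====
-- pass 1: flat count of every adjacent pair (zip(sentence, sentence[1:]); [1:] on a list is .tail);
-- pass 2: nest the flat table into result[a][b] = count.
def make_bigram_alt (data : List (List String)) : List (String × List (String × Int)) :=
  let flat : PySem.Dict (String × String) Int :=
    data.foldl (fun flat sentence =>
      (sentence.zip sentence.tail).foldl (fun flat pair =>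
        flat.insert pair (flat.getD pair 0 + 1)) flat) PySem.Dict.empty
  let bigram : PySem.Dict String (PySem.Dict String Int) :=
    flat.items.foldl (fun bigram q =>
      let bigram := if bigram.contains q.1.1 then bigram else bigram.insert q.1.1 PySem.Dict.empty
      bigram.insert q.1.1 ((bigram.getD q.1.1 PySem.Dict.empty).insert q.1.2 q.2)) PySem.Dict.empty
  bigram.items.map (fun p => (p.1, p.2.items))

-- ===== PRECONDITION & SPEC =====
def Spec_make_bigram (data : List (List String)) (out : List (String × List (String × Int))) : Prop := out = make_bigram_alt data
instance (data : List (List String)) (out : List (String × List (String × Int))) : Decidable (Spec_make_bigram data out) := by unfold Spec_make_bigram; infer_instance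

-- ===== CLAIM (what is proved, stated in full; the proofs are below) =====
def Claim_equal_make_bigram : Prop := ∀ (data : List (List String)), Dom_make_bigram data → Spec_make_bigram data (make_bigram data)

-- ===== LEMMAS AND PROOFS =====

/-- A's per-pair step, collapsed: increment the nested count at (p.1, p.2). -/
def nInc (bg : PySem.Dict String (PySem.Dict String Int)) (p : String × String) :
    PySem.Dict String (PySem.Dict String Int) :=
  bg.insert p.1 ((bg.getD p.1 PySem.Dict.empty).insert p.2
    ((bg.getD p.1 PySem.Dict.empty).getD p.2 0 + 1))

/-- B's per-item step, collapsed: set the nested entry at (q.1.1, q.1.2) to q.2. -/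
def nSet (bg : PySem.Dict String (PySem.Dict String Int)) (q : (String × String) × Int) :
    PySem.Dict String (PySem.Dict String Int) :=
  bg.insert q.1.1 ((bg.getD q.1.1 PySem.Dict.empty).insert q.1.2 q.2)

/-- B's second pass over an items list. -/
def nest (L : List ((String × String) × Int)) : PySem.Dict String (PySem.Dict String Int) :=
  L.foldl nSet PySem.Dict.empty

theorem nest_append (L : List ((String × String) × Int)) (q : (String × String) × Int) :
    nest (L ++ [q]) = nSet (nest L) q := by
  simp [nest, List.foldl_append]

/-- Outer membership in the nested fold. -/
theorem nest_contains (L : List ((String × String) × Int)) (a : String) :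
    (nest L).contains a = (L.map (fun q => q.1.1)).contains a := by
  induction L using List.reverseRecOn with
  | nil => simp [nest, PySem.Dict.contains_empty]
  | append_singleton L q ih =>
    rw [nest_append]
    simp only [nSet, PySem.Dict.contains_insert, ih, List.contains_eq_mem]
    by_cases he : a = q.1.1 <;> by_cases hm : a ∈ L.map (fun q => q.1.1) <;>
      simp [he, hm, List.mem_append]

/-- Inner membership in the nested fold. -/
theorem nest_inner_contains (L : List ((String × String) × Int)) (a b : String) :
    ((nest L).getD a PySem.Dict.empty).contains b = decide ((a, b) ∈ L.map (fun q => q.1)) := by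
  induction L using List.reverseRecOn with
  | nil => simp [nest, PySem.Dict.getD_empty, PySem.Dict.contains_empty]
  | append_singleton L q ih =>
    rw [nest_append]
    by_cases h : a = q.1.1
    · subst h
      simp only [nSet, PySem.Dict.getD_insert_self, PySem.Dict.contains_insert, ih]
      by_cases he : b = q.1.2 <;> by_cases hm : (q.1.1, b) ∈ L.map (fun q => q.1) <;>
        simp [he, hm, List.mem_append, Prod.ext_iff]
    · simp [nSet, PySem.Dict.getD_insert_of_ne _ _ _ h, ih, List.mem_append, Prod.ext_iff, h]

/-- Two inserts at distinct keys commute when the first key is already present. -/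
theorem insert_comm_of_contains {κ ν : Type} [BEq κ] [LawfulBEq κ]
    (d : PySem.Dict κ ν) {k k' : κ} (v w : ν) (hc : d.contains k = true) (hne : k ≠ k') :
    (d.insert k v).insert k' w = (d.insert k' w).insert k v := by
  have hkk' : (k' == k) = false := by simp [hne.symm]
  have hk'k : (k == k') = false := by simp [hne]
  by_cases hc' : d.contains k' = true
  · apply PySem.Dict.ext
    rw [PySem.Dict.items_insert_of_contains _ w
          (by simp [PySem.Dict.contains_insert, hkk', hc']),
        PySem.Dict.items_insert_of_contains _ v hc,
        PySem.Dict.items_insert_of_contains _ v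
          (by simp [PySem.Dict.contains_insert, hk'k, hc]),
        PySem.Dict.items_insert_of_contains _ w hc',
        List.map_map, List.map_map]
    apply List.map_congr_left
    intro p _
    by_cases h1 : p.1 = k <;> by_cases h2 : p.1 = k' <;>
      simp [Function.comp, h1, h2, hkk', hk'k]
  · have hc'f : d.contains k' = false := by simpa using hc'
    apply PySem.Dict.ext
    rw [PySem.Dict.items_insert_of_not_contains _ w
          (by simp [PySem.Dict.contains_insert, hkk', hc'f]),
        PySem.Dict.items_insert_of_contains _ v hc,
        PySem.Dict.items_insert_of_contains _ v
          (by simp [PySem.Dict.contains_insert, hk'k, hc]),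
        PySem.Dict.items_insert_of_not_contains _ w hc'f,
        List.map_append]
    simp [hkk']

/-- Bumping the (unique) entry at key p, then nesting, is nesting then nested-incrementing. -/
theorem nest_bump (L : List ((String × String) × Int)) (p : String × String)
    (hnd : (L.map (fun q => q.1)).Nodup) (hp : p ∈ L.map (fun q => q.1)) :
    nest (L.map (fun q => if q.1 == p then (q.1, q.2 + 1) else q)) = nInc (nest L) p := by
  induction L using List.reverseRecOn with
  | nil => simp at hp
  | append_singleton L x ih =>
    rw [List.map_append] at hnd hp ⊢
    by_cases hx : x.1 = p
    · have hpL : p ∉ L.map (fun q => q.1) := by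
        have hd := (List.nodup_append.mp hnd).2.2
        intro hmem; exact hd p hmem x.1 (by simp) hx.symm
      have hLid : L.map (fun q => if q.1 == p then (q.1, q.2 + 1) else q) = L := by
        have h1 : ∀ q ∈ L, (if q.1 == p then (q.1, q.2 + 1) else q) = q := by
          intro q hq
          have : q.1 ≠ p := fun h => hpL (h ▸ List.mem_map_of_mem hq)
          simp [this]
        rw [List.map_congr_left h1]; simp
      rw [hLid, List.map_singleton, nest_append, nest_append]
      simp only [nSet, nInc, hx, beq_self_eq_true, if_true]
      rw [PySem.Dict.getD_insert_self, PySem.Dict.getD_insert_self,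
        PySem.Dict.insert_insert_self, PySem.Dict.insert_insert_self]
    · have hpL : p ∈ L.map (fun q => q.1) := by
        rcases List.mem_append.mp hp with h | h
        · exact h
        · simp at h; exact absurd h.symm hx
      have hndL : (L.map (fun q => q.1)).Nodup := (List.nodup_append.mp hnd).1
      have hbx : (if x.1 == p then (x.1, x.2 + 1) else x) = x := by simp [hx]
      rw [List.map_singleton, hbx, nest_append, nest_append, ih hndL hpL]
      obtain ⟨a, b⟩ := p
      obtain ⟨⟨a', b'⟩, c⟩ := x
      have hbin : ((nest L).getD a PySem.Dict.empty).contains b = true := by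
        rw [nest_inner_contains]; simpa using hpL
      have hain : (nest L).contains a = true := by
        rw [nest_contains]
        rcases List.mem_map.mp hpL with ⟨q, hq, hq1⟩
        simp only [List.contains_eq_mem, decide_eq_true_eq, List.mem_map]
        exact ⟨q, hq, by rw [hq1]⟩
      by_cases ha : a' = a
      · subst ha
        have hbb' : b ≠ b' := by
          intro h; exact hx (by simp [h])
        simp only [nSet, nInc]
        rw [PySem.Dict.getD_insert_self, PySem.Dict.getD_insert_self,
          PySem.Dict.insert_insert_self, PySem.Dict.insert_insert_self,
          PySem.Dict.getD_insert_of_ne _ _ _ hbb']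
        congr 1
        exact insert_comm_of_contains _ _ _ hbin hbb'
      · simp only [nSet, nInc]
        rw [PySem.Dict.getD_insert_of_ne _ _ _ ha,
          PySem.Dict.getD_insert_of_ne _ _ _ (Ne.symm ha)]
        exact insert_comm_of_contains _ _ _ hain (Ne.symm ha)

/-- Main invariant: A's incremental fold over a pair list equals nesting the pair counter. -/
theorem fold_nInc_eq_nest_counter (ps : List (String × String)) :
    ps.foldl nInc PySem.Dict.empty = nest (PySem.Dict.counter ps).items := by
  induction ps using List.reverseRecOn with
  | nil => rfl
  | append_singleton ps p ih =>
    rw [List.foldl_append, List.foldl_cons, List.foldl_nil,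
      PySem.Dict.counter_append_singleton]
    have hmod : (PySem.Dict.counter ps).modify p 0 (fun x => x + 1)
        = (PySem.Dict.counter ps).insert p ((PySem.Dict.counter ps).getD p 0 + 1) := rfl
    rw [hmod, ih]
    by_cases hc : (PySem.Dict.counter ps).contains p = true
    · rw [PySem.Dict.items_insert_of_contains _ _ hc]
      have hnd : ((PySem.Dict.counter ps).items.map (fun q => q.1)).Nodup := by
        simpa [PySem.Dict.keys] using PySem.Dict.nodup_keys_counter ps
      have hp : p ∈ (PySem.Dict.counter ps).items.map (fun q => q.1) := by
        have hk := (PySem.Dict.contains_iff_mem_keys _ _).mp hc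
        simpa [PySem.Dict.keys] using hk
      have hmaps : (PySem.Dict.counter ps).items.map
            (fun q => if q.1 == p then (p, (PySem.Dict.counter ps).getD p 0 + 1) else q)
          = (PySem.Dict.counter ps).items.map
            (fun q => if q.1 == p then (q.1, q.2 + 1) else q) := by
        apply List.map_congr_left
        rintro ⟨k, v⟩ hq
        by_cases h : k = p
        · subst h
          have hget : (PySem.Dict.counter ps).getD k 0 = v :=
            PySem.Dict.getD_of_mem_items _ hq (PySem.Dict.nodup_keys_counter ps) 0
          simp [hget]
        · simp [h]
      rw [hmaps, nest_bump _ p hnd hp]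
    · have hcf : (PySem.Dict.counter ps).contains p = false := by simpa using hc
      rw [PySem.Dict.items_insert_of_not_contains _ _ hcf,
        PySem.Dict.getD_of_not_contains _ _ hcf, nest_append]
      have hnotin : ((nest (PySem.Dict.counter ps).items).getD p.1
          PySem.Dict.empty).contains p.2 = false := by
        rw [nest_inner_contains]
        simp only [decide_eq_false_iff_not]
        intro hmem
        have hk : p ∈ (PySem.Dict.counter ps).keys := by
          simpa [PySem.Dict.keys] using hmem
        rw [← PySem.Dict.contains_iff_mem_keys] at hk
        simp [hcf] at hk
      simp [nInc, nSet, PySem.Dict.getD_of_not_contains _ _ hnotin]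

/-- A's branchy inner body is `nInc`. -/
theorem stepA_eq_nInc (bg : PySem.Dict String (PySem.Dict String Int)) (w w1 : String) :
    (if bg.contains w then
      if (bg.getD w PySem.Dict.empty).contains w1 then
        bg.insert w ((bg.getD w PySem.Dict.empty).insert w1
          ((bg.getD w PySem.Dict.empty).getD w1 0 + 1))
      else
        bg.insert w ((bg.getD w PySem.Dict.empty).insert w1 1)
    else
      let bg' := bg.insert w (PySem.Dict.empty : PySem.Dict String Int)
      bg'.insert w ((bg'.getD w PySem.Dict.empty).insert w1 1)) = nInc bg (w, w1) := by
  by_cases h1 : bg.contains w = true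
  · by_cases h2 : (bg.getD w PySem.Dict.empty).contains w1 = true
    · simp [h1, h2, nInc]
    · have h2f : (bg.getD w PySem.Dict.empty).contains w1 = false := by simpa using h2
      simp [h1, h2f, nInc, PySem.Dict.getD_of_not_contains _ _ h2f]
  · have h1f : bg.contains w = false := by simpa using h1
    simp only [h1f, Bool.false_eq_true, if_false, nInc,
      PySem.Dict.getD_of_not_contains bg _ h1f,
      PySem.Dict.getD_insert_self, PySem.Dict.insert_insert_self,
      PySem.Dict.getD_empty]
    norm_num

/-- B's branchy second-pass body is `nSet`. -/
theorem stepB_eq_nSet (bg : PySem.Dict String (PySem.Dict String Int))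
    (q : (String × String) × Int) :
    (let bg' := if bg.contains q.1.1 then bg else bg.insert q.1.1 PySem.Dict.empty
     bg'.insert q.1.1 ((bg'.getD q.1.1 PySem.Dict.empty).insert q.1.2 q.2)) = nSet bg q := by
  by_cases h1 : bg.contains q.1.1 = true
  · simp [h1, nSet]
  · have h1f : bg.contains q.1.1 = false := by simpa using h1
    simp only [h1f, Bool.false_eq_true, if_false, nSet,
      PySem.Dict.getD_of_not_contains bg _ h1f,
      PySem.Dict.getD_insert_self, PySem.Dict.insert_insert_self]

/-- The index pairs of A's inner loop are exactly zip(s, s.tail). -/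
theorem range_pairs_eq_zip (s : List String) :
    (List.range (s.length - 1)).map (fun k => (s.getD k "", s.getD (k + 1) "")) =
      s.zip s.tail := by
  apply List.ext_getElem
  · simp
  · intro i h1 h2
    simp only [List.getElem_map, List.getElem_range, List.getElem_zip, List.getElem_tail]
    have hi : i < s.length - 1 := by simpa using h1
    rw [List.getD_eq_getElem s "" (by omega), List.getD_eq_getElem s "" (by omega)]

/-- A's inner index loop is the fold of `nInc` over the adjacent pairs. -/
theorem innerA_eq (s : List String) (bg : PySem.Dict String (PySem.Dict String Int)) :
    (PySem.List.pyRange 0 ((s.length : Int) - 1)).foldl (fun bigram word =>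
        let w : String := PySem.List.pyGetD s word ""
        let w1 : String := PySem.List.pyGetD s (word + 1) ""
        if bigram.contains w then
          if (bigram.getD w PySem.Dict.empty).contains w1 then
            bigram.insert w ((bigram.getD w PySem.Dict.empty).insert w1
              ((bigram.getD w PySem.Dict.empty).getD w1 0 + 1))
          else
            bigram.insert w ((bigram.getD w PySem.Dict.empty).insert w1 1)
        else
          let bigram := bigram.insert w (PySem.Dict.empty : PySem.Dict String Int)
          bigram.insert w ((bigram.getD w PySem.Dict.empty).insert w1 1)) bg
      = (s.zip s.tail).foldl nInc bg := by
  cases s with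
  | nil => rfl
  | cons x t =>
    have hl : (((x :: t).length : Int) - 1) = ((t.length : Nat) : Int) := by
      simp
    rw [hl, PySem.List.pyRange_zero_natCast, List.foldl_map,
      ← range_pairs_eq_zip (x :: t), List.foldl_map]
    have hlen : (x :: t).length - 1 = t.length := by simp
    rw [hlen]
    apply PySem.List.foldl_congr_mem
    intro acc k _
    have hcast : ((k : Int) + 1) = ((k + 1 : Nat) : Int) := by push_cast; ring
    simp only [PySem.List.pyGetD_natCast, hcast]
    exact stepA_eq_nInc acc _ _

-- ===== VERDICT (by name: the statement is the Claim_ definition above) =====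
theorem make_bigram_spec : Claim_equal_make_bigram := by
  intro data _
  unfold Spec_make_bigram make_bigram make_bigram_alt
  have hA : ∀ (init : PySem.Dict String (PySem.Dict String Int)),
      data.foldl (fun bigram sentence =>
        (PySem.List.pyRange 0 ((sentence.length : Int) - 1)).foldl (fun bigram word =>
          let w : String := PySem.List.pyGetD sentence word ""
          let w1 : String := PySem.List.pyGetD sentence (word + 1) ""
          if bigram.contains w then
            if (bigram.getD w PySem.Dict.empty).contains w1 then
              bigram.insert w ((bigram.getD w PySem.Dict.empty).insert w1
                ((bigram.getD w PySem.Dict.empty).getD w1 0 + 1))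
            else
              bigram.insert w ((bigram.getD w PySem.Dict.empty).insert w1 1)
          else
            let bigram := bigram.insert w (PySem.Dict.empty : PySem.Dict String Int)
            bigram.insert w ((bigram.getD w PySem.Dict.empty).insert w1 1)
        ) bigram) init
      = (data.flatMap (fun s => s.zip s.tail)).foldl nInc init := by
    intro init
    rw [List.foldl_flatMap]
    apply PySem.List.foldl_congr_mem
    intro acc s _
    exact innerA_eq s acc
  have hB : data.foldl (fun flat sentence =>
        (sentence.zip sentence.tail).foldl (fun flat pair =>
          flat.insert pair (flat.getD pair 0 + 1)) flat) PySem.Dict.empty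
      = PySem.Dict.counter (data.flatMap (fun s => s.zip s.tail)) := by
    rw [← PySem.Dict.foldl_insert_getD_add_one_eq_counter, List.foldl_flatMap]
  have hnest : ∀ (L : List ((String × String) × Int)),
      L.foldl (fun bigram q =>
        let bigram := if bigram.contains q.1.1 then bigram
          else bigram.insert q.1.1 PySem.Dict.empty
        bigram.insert q.1.1 ((bigram.getD q.1.1 PySem.Dict.empty).insert q.1.2 q.2))
        PySem.Dict.empty = nest L := by
    intro L
    apply PySem.List.foldl_congr_mem
    intro acc q _
    exact stepB_eq_nSet acc q
  simp only [hA, hB, hnest, fold_nInc_eq_nest_counter]
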